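-- pv_equiv track=rewrite | github.com/T-Python-June-24/LAB_FUNCTIONS_101 | main.py | write_in_sequence2
-- ===== SOURCE A (Python) =====
-- def write_in_sequence2(num) -> str:
--     """
--     This function is taking a number which usually comes from the user,
--     the given parameter will be stored in a temporary variable, to keep track the range of the numbers
--     so while the temporary value is bigger than 0, we loop through a range of the current_iteration to 0 decrementing it,
--     for example, if the user entered 5, the current_iteration will become 5 and the for loop is adding from the range of 5
--     to that string, then it will be decremented, and become 4, and the loop will start again but with value of 4, and with that till
--     it becomes 0, so the current iteration is the controller, and when each iteration ended, we add a "\n" to skip to the next line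
--
--     """
--     current_iteration = num
--     temporary_string = ""
--
--     while current_iteration > 0:
--
--         for number in range(current_iteration, 0, -1):
--             temporary_string += str(number) + " "
--
--         temporary_string += "\n"
--         current_iteration -= 1
--     return temporary_string
-- ===== SOURCE B (Python) =====
-- def write_in_sequence2(num) -> str:
--     # One pass: each line is str(k) + " " + previous line, reused instead of rebuilt.
--     lines = []
--     current_line = ""
--     for k in range(1, num + 1):
--         current_line = str(k) + " " + current_line
--         lines.append(current_line)
--     result = ""
--     for line in reversed(lines):
--         result += line + "\n"
--     return result
-- ===== Notes on version B (the rewrite author's own statement) =====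
-- stated objective: alternative
-- what changed: Replaces the nested while/for that rebuilds every row number-by-number with a single ascending pass that extends the previous line by one number (current_line = str(k)+' '+current_line) and then emits the stored lines in reverse order.
import Mathlib
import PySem

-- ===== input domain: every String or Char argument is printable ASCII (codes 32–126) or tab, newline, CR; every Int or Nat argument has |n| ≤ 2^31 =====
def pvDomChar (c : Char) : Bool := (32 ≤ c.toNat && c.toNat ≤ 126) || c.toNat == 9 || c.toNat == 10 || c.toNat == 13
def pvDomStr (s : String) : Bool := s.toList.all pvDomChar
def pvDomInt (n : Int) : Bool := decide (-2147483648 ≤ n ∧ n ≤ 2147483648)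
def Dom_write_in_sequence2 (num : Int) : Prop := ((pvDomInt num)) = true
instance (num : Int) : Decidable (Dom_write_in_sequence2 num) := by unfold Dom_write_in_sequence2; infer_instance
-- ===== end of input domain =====

-- B rebuilds each line from the previous one in a single ascending pass instead of A's nested while/for.
-- Both ports work on List Char (Python str concatenation = list append) and wrap with String.ofList at the end.

-- ===== PORT A =====
-- inner for-loop: for number in range(current_iteration, 0, -1): temporary_string += str(number) + " "
def aRow (c : Int) (s : List Char) : List Char :=
  (PySem.List.pyRange c 0 (-1)).foldl (fun acc n => acc ++ PySem.Int.toChars n ++ [' ']) s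

-- outer while-loop
def aGo (c : Int) (s : List Char) : List Char :=
  if c > 0 then aGo (c - 1) (aRow c s ++ ['\n']) else s
termination_by c.toNat
decreasing_by omega

def write_in_sequence2 (num : Int) : String := String.ofList (aGo num [])

-- ===== PORT B =====
-- one loop step: current_line = str(k) + " " + current_line; lines.append(current_line)
def bStep (st : List (List Char) × List Char) (k : Int) : List (List Char) × List Char :=
  let cur := PySem.Int.toChars k ++ ' ' :: st.2
  (st.1 ++ [cur], cur)

def write_in_sequence2_alt (num : Int) : String :=
  let st := (PySem.List.pyRange 1 (num + 1) 1).foldl bStep ([], [])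
  String.ofList (st.1.reverse.foldl (fun out line => out ++ line ++ ['\n']) [])

-- ===== PRECONDITION & SPEC =====
def Spec_write_in_sequence2 (num : Int) (out : String) : Prop := out = write_in_sequence2_alt num
instance (num : Int) (out : String) : Decidable (Spec_write_in_sequence2 num out) := by unfold Spec_write_in_sequence2; infer_instance

-- ===== CLAIM (what is proved, stated in full; the proofs are below) =====
def Claim_equal_write_in_sequence2 : Prop := ∀ (num : Int), Dom_write_in_sequence2 num → Spec_write_in_sequence2 num (write_in_sequence2 num)

-- ===== LEMMAS AND PROOFS =====

-- the k-th line "k k-1 ... 1 "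
def rowStr : Nat → List Char
  | 0 => []
  | k + 1 => PySem.Int.toChars ((k : Int) + 1) ++ ' ' :: rowStr k

-- the whole triangle for n rows
def triangle : Nat → List Char
  | 0 => []
  | k + 1 => rowStr (k + 1) ++ '\n' :: triangle k

def linesList : Nat → List (List Char)
  | 0 => []
  | k + 1 => linesList k ++ [rowStr (k + 1)]

lemma aRow_eq (k : Nat) (s : List Char) : aRow (k : Int) s = s ++ rowStr k := by
  induction k generalizing s with
  | zero => simp [aRow, PySem.List.pyRange_neg_one_eq_nil (by omega : (0:Int) ≤ 0), rowStr]
  | succ k ih =>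
      rw [aRow, PySem.List.pyRange_neg_one_cons (by exact_mod_cast Nat.succ_pos k)]
      have : ((k + 1 : Nat) : Int) - 1 = (k : Int) := by push_cast; ring
      simp only [List.foldl_cons, this]
      rw [show ((PySem.List.pyRange (k : Int) 0 (-1)).foldl
            (fun acc n => acc ++ PySem.Int.toChars n ++ [' '])
            (s ++ PySem.Int.toChars ((k + 1 : Nat) : Int) ++ [' '])) = aRow (k : Int)
            (s ++ PySem.Int.toChars ((k + 1 : Nat) : Int) ++ [' ']) from rfl, ih]
      simp [rowStr]

lemma aGo_eq (k : Nat) (s : List Char) : aGo (k : Int) s = s ++ triangle k := by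
  induction k generalizing s with
  | zero => rw [aGo]; simp [triangle]
  | succ k ih =>
      rw [aGo]
      have hpos : ((k + 1 : Nat) : Int) > 0 := by exact_mod_cast Nat.succ_pos k
      rw [if_pos hpos]
      have : ((k + 1 : Nat) : Int) - 1 = (k : Int) := by push_cast; ring
      rw [this, ih, aRow_eq]
      simp [triangle]

lemma aGo_nonpos (c : Int) (h : ¬ c > 0) (s : List Char) : aGo c s = s := by
  rw [aGo, if_neg h]

lemma bBuild_eq (k : Nat) :
    (PySem.List.pyRange 1 ((k : Int) + 1) 1).foldl bStep ([], []) = (linesList k, rowStr k) := by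
  induction k with
  | zero => simp [linesList, rowStr]
  | succ k ih =>
      have hc : ((k + 1 : Nat) : Int) = (k : Int) + 1 := by push_cast; ring
      rw [hc, PySem.List.pyRange_one_succ_right (by omega : (1:Int) ≤ (k:Int) + 1)]
      rw [List.foldl_append, ih]
      simp only [List.foldl_cons, List.foldl_nil, bStep, linesList, rowStr]

lemma out_eq (k : Nat) (out : List Char) :
    (linesList k).reverse.foldl (fun out line => out ++ line ++ ['\n']) out = out ++ triangle k := by
  induction k generalizing out with
  | zero => simp [linesList, triangle]
  | succ k ih =>
      simp only [linesList, List.reverse_append, List.reverse_cons, List.reverse_nil,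
        List.nil_append, List.singleton_append, List.foldl_cons, ih, triangle]
      simp

lemma alt_eq_triangle (num : Int) : write_in_sequence2_alt num = String.ofList (triangle num.toNat) := by
  unfold write_in_sequence2_alt
  by_cases h : num ≤ 0
  · rw [PySem.List.pyRange_one_eq_nil (by omega : num + 1 ≤ 1)]
    have : num.toNat = 0 := by omega
    simp [this, triangle]
  · obtain ⟨k, hk⟩ : ∃ k : Nat, num = (k : Int) := ⟨num.toNat, by omega⟩
    subst hk
    rw [bBuild_eq, Int.toNat_natCast]
    exact congrArg String.ofList (out_eq k [])

lemma a_eq_triangle (num : Int) : write_in_sequence2 num = String.ofList (triangle num.toNat) := by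
  unfold write_in_sequence2
  by_cases h : num ≤ 0
  · rw [aGo_nonpos num (by omega)]
    have : num.toNat = 0 := by omega
    simp [this, triangle]
  · obtain ⟨k, hk⟩ : ∃ k : Nat, num = (k : Int) := ⟨num.toNat, by omega⟩
    subst hk
    rw [aGo_eq, Int.toNat_natCast, List.nil_append]

-- ===== VERDICT (by name: the statement is the Claim_ definition above) =====
theorem write_in_sequence2_spec : Claim_equal_write_in_sequence2 := by
  intro num _
  unfold Spec_write_in_sequence2
  rw [a_eq_triangle, alt_eq_triangle]
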